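-- pv_equiv track=rewrite | github.com/typosquatter/ail-typo-squatting | bin/typo.py | globalAppend
-- ===== SOURCE A (Python) =====
-- def globalAppend(loclist):
--     r = list()
--     rloc = list()
--     result = list()
--     cp = True
--     i = 0
--     while i < len(loclist):
--         # First iteration, concat first words, ex: google.abuse.com -> concat variation for google and abuse
--         if cp:
--             for element in loclist[i]:
--                 for element2 in loclist[i+1]:
--                     if f"{element}.{element2}" not in result:
--                         result.append(f"{element}.{element2}")
--             i += 1
--             cp = False
--             r.append(result)
--         # concat other word with latest concatanation, ex: google.abuse.com -> concat goole.ause and com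
--         else:
--             for element in r[-1]:
--                 for add in loclist[i]:
--                     if f"{element}.{add}" not in rloc:
--                         rloc.append(f"{element}.{add}")
--             r.append(rloc)
--             rloc = list()
--         i += 1
--
--     return r[-1]
-- ===== SOURCE B (Python) =====
-- def globalAppend(loclist):
--     combos = [f"{a}.{b}" for a in loclist[0] for b in loclist[1]]
--     for words in loclist[2:]:
--         combos = [f"{p}.{w}" for p in combos for w in words]
--     out = []
--     seen = set()
--     for s in combos:
--         if s not in seen:
--             seen.add(s)
--             out.append(s)
--     return out
-- ===== Notes on version B (the rewrite author's own statement) =====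
-- stated objective: idiomatic
-- what changed: B builds the full Cartesian concatenation by flat comprehensions level by level without any intermediate dedup and removes duplicates in one final first-occurrence pass using a set, instead of A's while-loop state machine (cp flag, r, rloc) that dedups at every level with a linear 'not in list' test.
import Mathlib
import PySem

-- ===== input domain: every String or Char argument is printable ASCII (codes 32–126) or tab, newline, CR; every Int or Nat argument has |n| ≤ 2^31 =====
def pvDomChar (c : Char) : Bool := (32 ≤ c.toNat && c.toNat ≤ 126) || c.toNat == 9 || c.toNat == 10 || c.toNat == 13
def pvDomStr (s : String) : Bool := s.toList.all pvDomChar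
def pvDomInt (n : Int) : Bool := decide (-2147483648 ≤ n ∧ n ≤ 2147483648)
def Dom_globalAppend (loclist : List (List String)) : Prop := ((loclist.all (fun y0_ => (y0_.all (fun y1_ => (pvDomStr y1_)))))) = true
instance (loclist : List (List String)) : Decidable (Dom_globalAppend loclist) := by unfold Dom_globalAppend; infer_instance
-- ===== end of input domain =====

-- B removes A's level-by-level dedup bookkeeping: it builds all dotted combinations by flat
-- comprehensions and dedups once at the end with a set (objective: idiomatic; return value proved equal).

-- ===== PORT A =====
-- while loop with cp flag: first iteration pairs loclist[0] with loclist[1] into `result`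
-- (appending only unseen strings), each later iteration pairs the previous level with loclist[i];
-- returns the last level.  r[-1] / loclist[i+1] raise IndexError when len(loclist) < 2 (see Pre_).
def globalAppend (loclist : List (List String)) : List String :=
  match loclist with
  | l0 :: l1 :: rest =>
    let result := l0.foldl (fun res e => l1.foldl (fun res e2 =>
        if (e ++ "." ++ e2) ∈ res then res else res ++ [e ++ "." ++ e2]) res) []
    rest.foldl (fun prev ws => prev.foldl (fun rloc e => ws.foldl (fun rloc a =>
        if (e ++ "." ++ a) ∈ rloc then rloc else rloc ++ [e ++ "." ++ a]) rloc) []) result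
  | _ => []   -- unreachable under Pre_ (the Python raises IndexError here)

-- ===== PORT B =====
def globalAppend_alt (loclist : List (List String)) : List String :=
  match loclist with
  | [] => []      -- unreachable under Pre_ (the Python raises IndexError here)
  | [_] => []     -- unreachable under Pre_ (the Python raises IndexError here)
  | l0 :: l1 :: rest =>
    let combos0 := l0.flatMap (fun a => l1.map (fun b => a ++ "." ++ b))
    let combos := rest.foldl (fun cs ws => cs.flatMap (fun p => ws.map (fun w => p ++ "." ++ w))) combos0
    (combos.foldl (fun (st : List String × PySem.Set String) s =>
        if st.2.contains s then st else (st.1 ++ [s], PySem.Set.add st.2 s)) ([], PySem.Set.empty)).1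

-- ===== PRECONDITION & SPEC =====
-- Pre_ excludes exactly the inputs on which the Python A raises IndexError (fewer than two word lists).
def Pre_globalAppend (loclist : List (List String)) : Prop := 2 ≤ loclist.length
instance (loclist : List (List String)) : Decidable (Pre_globalAppend loclist) := by unfold Pre_globalAppend; infer_instance
def pvWitness_globalAppend : List (List String) := [["a", "b"], ["c"]]
def Spec_globalAppend (loclist : List (List String)) (out : List String) : Prop := out = globalAppend_alt loclist
instance (loclist : List (List String)) (out : List String) : Decidable (Spec_globalAppend loclist out) := by unfold Spec_globalAppend; infer_instance

-- ===== CLAIM (what is proved, stated in full; the proofs are below) =====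
def Claim_equal_globalAppend : Prop := ∀ (loclist : List (List String)), Dom_globalAppend loclist → Pre_globalAppend loclist → Spec_globalAppend loclist (globalAppend loclist)

-- ===== LEMMAS AND PROOFS =====

-- first-occurrence insertion and dedup (the operation A's `if … not in …: append` performs)
def sAdd (res : List String) (s : String) : List String := if s ∈ res then res else res ++ [s]

def ddA (acc : List String) (xs : List String) : List String := xs.foldl sAdd acc

-- first-occurrence dedup relative to a seen list, structural form
def fd (seen : List String) : List String → List String
  | [] => []
  | x :: xs => if x ∈ seen then fd seen xs else x :: fd (x :: seen) xs

theorem mem_sAdd (res : List String) (s t : String) : t ∈ sAdd res s ↔ t ∈ res ∨ t = s := by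
  unfold sAdd; split_ifs with h
  · simp; intro he; simp [he, h]
  · simp

theorem mem_ddA (xs : List String) (acc : List String) (t : String) :
    t ∈ ddA acc xs ↔ t ∈ acc ∨ t ∈ xs := by
  induction xs generalizing acc with
  | nil => simp [ddA]
  | cons x xs ih =>
    simp only [ddA, List.foldl_cons] at *
    rw [ih, mem_sAdd]; simp; tauto

theorem ddA_absorb (ys : List String) (acc : List String) (h : ∀ t ∈ ys, t ∈ acc) :
    ddA acc ys = acc := by
  induction ys generalizing acc with
  | nil => rfl
  | cons y ys ih =>
    simp only [ddA, List.foldl_cons]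
    have hy : y ∈ acc := h y (by simp)
    rw [show sAdd acc y = acc by simp [sAdd, hy]]
    exact ih acc (fun t ht => h t (by simp [ht]))

theorem fd_congr (xs : List String) (s1 s2 : List String) (h : ∀ t, t ∈ s1 ↔ t ∈ s2) :
    fd s1 xs = fd s2 xs := by
  induction xs generalizing s1 s2 with
  | nil => rfl
  | cons x xs ih =>
    simp only [fd]
    by_cases hx : x ∈ s1
    · rw [if_pos hx, if_pos ((h x).1 hx)]; exact ih s1 s2 h
    · rw [if_neg hx, if_neg (fun hc => hx ((h x).2 hc))]
      exact congrArg _ (ih (x :: s1) (x :: s2) (by intro t; simp [h t]))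

theorem ddA_eq_append_fd (xs : List String) (acc : List String) :
    ddA acc xs = acc ++ fd acc xs := by
  induction xs generalizing acc with
  | nil => simp [ddA, fd]
  | cons x xs ih =>
    simp only [ddA, List.foldl_cons, fd, sAdd]
    by_cases hx : x ∈ acc
    · rw [if_pos hx, if_pos hx]; exact ih acc
    · rw [if_neg hx, if_neg hx]
      have := ih (acc ++ [x])
      simp only [ddA] at this
      rw [this, fd_congr xs (acc ++ [x]) (x :: acc) (by intro t; simp; tauto)]
      simp

theorem ddA_append (xs ys : List String) (acc : List String) :
    ddA acc (xs ++ ys) = ddA (ddA acc xs) ys := by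
  simp [ddA, List.foldl_append]

-- KEY LEMMA: dropping already-seen prefixes before extending does not change the deduped result
theorem ddA_flatMap_fd (f : String → List String) (xs : List String) :
    ∀ (seen res : List String), (∀ x ∈ seen, ∀ t ∈ f x, t ∈ res) →
    ddA res (xs.flatMap f) = ddA res ((fd seen xs).flatMap f) := by
  induction xs with
  | nil => intro seen res _; rfl
  | cons x xs ih =>
    intro seen res h
    simp only [List.flatMap_cons, fd]
    by_cases hx : x ∈ seen
    · rw [if_pos hx, ddA_append, ddA_absorb (f x) res (h x hx)]
      exact ih seen res h
    · rw [if_neg hx, List.flatMap_cons, ddA_append, ddA_append]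
      apply ih (x :: seen) (ddA res (f x))
      intro y hy t ht
      rcases List.mem_cons.mp hy with he | hs
      · exact (mem_ddA (f x) res t).2 (Or.inr (he ▸ ht))
      · exact (mem_ddA (f x) res t).2 (Or.inl (h y hs t ht))

theorem dd_flatMap_dd (f : String → List String) (xs : List String) :
    ddA [] ((ddA [] xs).flatMap f) = ddA [] (xs.flatMap f) := by
  rw [ddA_eq_append_fd xs []]
  simpa using (ddA_flatMap_fd f xs [] [] (by simp)).symm

-- A's nested pair loop is exactly first-occurrence dedup of the flat list of joins
theorem a_pair_loop (lp lw : List String) (acc : List String) :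
    lp.foldl (fun res e => lw.foldl (fun res e2 =>
        if (e ++ "." ++ e2) ∈ res then res else res ++ [e ++ "." ++ e2]) res) acc
    = ddA acc (lp.flatMap (fun e => lw.map (fun w => e ++ "." ++ w))) := by
  induction lp generalizing acc with
  | nil => rfl
  | cons e lp ih =>
    simp only [List.foldl_cons, List.flatMap_cons, ddA, List.foldl_append]
    rw [ih]
    congr 1
    rw [List.foldl_map]
    rfl

-- the A-side level fold equals dedup of the B-side raw product fold
theorem levels_eq (rest : List (List String)) : ∀ (raw : List String),
    rest.foldl (fun prev ws => prev.foldl (fun rloc e => ws.foldl (fun rloc a =>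
        if (e ++ "." ++ a) ∈ rloc then rloc else rloc ++ [e ++ "." ++ a]) rloc) []) (ddA [] raw)
    = ddA [] (rest.foldl (fun cs ws => cs.flatMap (fun p => ws.map (fun w => p ++ "." ++ w))) raw) := by
  induction rest with
  | nil => intro raw; rfl
  | cons ws rest ih =>
    intro raw
    simp only [List.foldl_cons]
    rw [a_pair_loop (ddA [] raw) ws []]
    rw [dd_flatMap_dd (fun e => ws.map (fun w => e ++ "." ++ w)) raw]
    exact ih _

-- B's final seen-set pass is first-occurrence dedup
theorem b_pass (xs : List String) : ∀ (seen : List String),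
    (xs.foldl (fun (st : List String × PySem.Set String) s =>
        if st.2.contains s then st else (st.1 ++ [s], PySem.Set.add st.2 s)) (seen, seen))
    = (ddA seen xs, ddA seen xs) := by
  induction xs with
  | nil => intro seen; rfl
  | cons x xs ih =>
    intro seen
    simp only [List.foldl_cons, ddA]
    by_cases hx : x ∈ seen
    · have hc : PySem.Set.contains seen x = true := by simpa using hx
      rw [if_pos hc, show sAdd seen x = seen by simp [sAdd, hx]]
      exact ih seen
    · have hc : ¬ PySem.Set.contains seen x = true := by simpa using hx
      rw [if_neg hc,
          show PySem.Set.add seen x = seen ++ [x] by simp [PySem.Set.add, hx],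
          show sAdd seen x = seen ++ [x] by simp [sAdd, hx]]
      exact ih (seen ++ [x])

-- ===== VERDICT (by name: the statement is the Claim_ definition above) =====
theorem globalAppend_spec : Claim_equal_globalAppend := by
  intro loclist _ hpre
  unfold Spec_globalAppend
  match loclist with
  | [] => exact absurd hpre (by simp [Pre_globalAppend])
  | [_] => exact absurd hpre (by simp [Pre_globalAppend])
  | l0 :: l1 :: rest =>
    show globalAppend (l0 :: l1 :: rest) = globalAppend_alt (l0 :: l1 :: rest)
    unfold globalAppend globalAppend_alt
    simp only
    rw [a_pair_loop l0 l1 [], levels_eq rest,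
        show (PySem.Set.empty : PySem.Set String) = ([] : List String) from rfl, b_pass _ []]
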